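-- pv_equiv track=rewrite | github.com/descampsk/advent-of-code | 2022/jeanRobertII/09/mainP2.py | isTouchingLegacy
-- ===== SOURCE A (Python) =====
-- def isTouchingLegacy(tPosition, hPosition):
--     adjacentCases = [
--         (hPosition[0]-1, hPosition[1]),
--         (hPosition[0], hPosition[1]+1),
--         (hPosition[0], hPosition[1]-1),
--         (hPosition[0]+1, hPosition[1]),
--     ]
--
--     for adjacentCase in adjacentCases:
--         if tPosition == adjacentCase:
--             return True
--
--     return False
-- ===== SOURCE B (Python) =====
-- def isTouchingLegacy(tPosition, hPosition):
--     # Manhattan distance exactly 1 characterizes the four orthogonal neighbours.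
--     return abs(tPosition[0] - hPosition[0]) + abs(tPosition[1] - hPosition[1]) == 1
-- ===== Notes on version B (the rewrite author's own statement) =====
-- stated objective: simpler
-- what changed: Replaces building a list of the four orthogonal neighbour positions and scanning it with a closed-form Manhattan-distance-equals-1 arithmetic test.
import Mathlib
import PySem

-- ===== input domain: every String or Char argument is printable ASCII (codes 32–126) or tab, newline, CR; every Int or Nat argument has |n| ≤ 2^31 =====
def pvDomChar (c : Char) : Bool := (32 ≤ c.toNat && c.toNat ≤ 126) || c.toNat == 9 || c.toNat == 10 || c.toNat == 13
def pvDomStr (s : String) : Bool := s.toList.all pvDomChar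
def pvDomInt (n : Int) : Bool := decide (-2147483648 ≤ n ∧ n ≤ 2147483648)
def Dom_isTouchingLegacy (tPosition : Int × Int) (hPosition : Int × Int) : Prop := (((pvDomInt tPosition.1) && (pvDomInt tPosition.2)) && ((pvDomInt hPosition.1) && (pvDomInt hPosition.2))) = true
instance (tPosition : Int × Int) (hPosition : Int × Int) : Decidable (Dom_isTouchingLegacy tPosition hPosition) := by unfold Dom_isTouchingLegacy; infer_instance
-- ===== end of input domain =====

-- ===== PORT A =====
-- header: B replaces the four-candidate list scan with a closed-form Manhattan-distance test (simpler).
def isTouchingLegacy (tPosition : Int × Int) (hPosition : Int × Int) : Bool :=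
  let adjacentCases : List (Int × Int) :=
    [ (hPosition.1 - 1, hPosition.2),
      (hPosition.1, hPosition.2 + 1),
      (hPosition.1, hPosition.2 - 1),
      (hPosition.1 + 1, hPosition.2) ]
  adjacentCases.any (fun adjacentCase => tPosition == adjacentCase)

-- ===== PORT B =====
def isTouchingLegacy_alt (tPosition : Int × Int) (hPosition : Int × Int) : Bool :=
  (tPosition.1 - hPosition.1).natAbs + (tPosition.2 - hPosition.2).natAbs == 1

-- ===== PRECONDITION & SPEC =====
def Spec_isTouchingLegacy (tPosition : Int × Int) (hPosition : Int × Int) (out : Bool) : Prop := out = isTouchingLegacy_alt tPosition hPosition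
instance (tPosition : Int × Int) (hPosition : Int × Int) (out : Bool) : Decidable (Spec_isTouchingLegacy tPosition hPosition out) := by unfold Spec_isTouchingLegacy; infer_instance

-- ===== CLAIM (what is proved, stated in full; the proofs are below) =====
def Claim_equal_isTouchingLegacy : Prop := ∀ (tPosition : Int × Int) (hPosition : Int × Int), Dom_isTouchingLegacy tPosition hPosition → Spec_isTouchingLegacy tPosition hPosition (isTouchingLegacy tPosition hPosition)

-- ===== LEMMAS AND PROOFS =====

-- ===== VERDICT (by name: the statement is the Claim_ definition above) =====
theorem isTouchingLegacy_spec : Claim_equal_isTouchingLegacy := by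
  intro tPosition hPosition _
  unfold Spec_isTouchingLegacy isTouchingLegacy isTouchingLegacy_alt
  obtain ⟨tx, ty⟩ := tPosition
  obtain ⟨hx, hy⟩ := hPosition
  rw [Bool.eq_iff_iff]
  simp [Prod.ext_iff]
  omega
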